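-- pv_equiv track=rewrite | github.com/Fansesi/mytokenizations | src/mytokenizations/abcd.py | _string_to_intdur
-- ===== SOURCE A (Python) =====
-- from typing import TYPE_CHECKING, List
-- from collections import Counter
--
-- def _string_to_intdur(string: str) -> List[List[int]]:
--     final = []
--
--     # a d cc d bb d ccc d d c d - no, you can't use split("d") here.
--     # what happens if I use d as the only note separator. Not twice but
--     # only once. aacccd bbbcd cd - this also works.
--
--     for note in string.split("d"):
--         if note == "":
--             continue
--         num = 0
--         counter = Counter(note)
--         if counter["a"] > 0:
--             num = counter["a"]  # / 2
--         elif counter["b"] > 0: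
--             num = -counter["b"]  # / 2
--
--         final.append([num, counter["c"]])
--
--     return final
-- ===== SOURCE B (Python) =====
-- def _string_to_intdur(string):
--     # Single left-to-right scan; no split list, no Counter objects.
--     final = []
--     a = b = c = 0
--     started = False
--     for ch in string:
--         if ch == "d":
--             if started:
--                 final.append([a if a > 0 else (-b if b > 0 else 0), c])
--             a = b = c = 0
--             started = False
--         else:
--             if ch == "a":
--                 a += 1
--             elif ch == "b":
--                 b += 1
--             elif ch == "c":
--                 c += 1
--             started = True
--     if started:
--         final.append([a if a > 0 else (-b if b > 0 else 0), c])
--     return final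
-- ===== Notes on version B (the rewrite author's own statement) =====
-- stated objective: faster
-- what changed: Replaces the delimiter-split plus per-segment Counter construction with a single left-to-right scan over the raw string that maintains three integer counters and a segment-seen flag, flushing a [num, dur] pair at each delimiter boundary; no split list and no Counter objects are built.
import Mathlib
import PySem

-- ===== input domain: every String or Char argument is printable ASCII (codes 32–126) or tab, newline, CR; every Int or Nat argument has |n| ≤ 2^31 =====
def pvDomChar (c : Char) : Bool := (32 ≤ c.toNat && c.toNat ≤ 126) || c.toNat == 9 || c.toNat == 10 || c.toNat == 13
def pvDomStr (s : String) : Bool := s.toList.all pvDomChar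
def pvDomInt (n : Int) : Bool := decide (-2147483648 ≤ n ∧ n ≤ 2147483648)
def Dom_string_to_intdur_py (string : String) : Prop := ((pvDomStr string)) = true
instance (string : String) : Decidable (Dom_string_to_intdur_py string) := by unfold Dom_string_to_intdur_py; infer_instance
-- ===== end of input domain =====

-- B replaces split("d")+Counter by one scan with three counters and a started flag (alternative decomposition, same O(n) cost).

-- ===== PORT A =====
-- for note in string.split("d"): skip empty; counter = Counter(note); num = a-count if >0 elif -b-count; append [num, c-count]
def string_to_intdur_py (string : String) : List (List Int) :=
  (PySem.Chars.splitOn string.toList ['d']).foldl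
    (fun final note =>
      if note = [] then final
      else
        let counter := PySem.Dict.counter note
        let num : Int :=
          if PySem.Dict.getD counter 'a' 0 > 0 then PySem.Dict.getD counter 'a' 0
          else if PySem.Dict.getD counter 'b' 0 > 0 then -(PySem.Dict.getD counter 'b' 0)
          else 0
        final ++ [[num, PySem.Dict.getD counter 'c' 0]])
    []

-- ===== PORT B =====
-- the [num, dur] pair B appends when flushing a segment (the repeated expression of Source B)
def pvFin (a b c : Int) : List Int := [if a > 0 then a else if b > 0 then -b else 0, c]

-- loop body of B's scan: state (a, b, c, started, final)
def pvStepB (s : Int × Int × Int × Bool × List (List Int)) (ch : Char) :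
    Int × Int × Int × Bool × List (List Int) :=
  match s with
  | (a, b, c, started, final) =>
    if ch = 'd' then
      (0, 0, 0, false, if started then final ++ [pvFin a b c] else final)
    else
      ((if ch = 'a' then a + 1 else a), (if ch = 'b' then b + 1 else b),
       (if ch = 'c' then c + 1 else c), true, final)

-- final flush after the loop
def pvFlushB (s : Int × Int × Int × Bool × List (List Int)) : List (List Int) :=
  match s with
  | (a, b, c, started, final) => if started then final ++ [pvFin a b c] else final

def string_to_intdur_py_alt (string : String) : List (List Int) :=
  pvFlushB (string.toList.foldl pvStepB (0, 0, 0, false, []))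

-- ===== PRECONDITION & SPEC =====
def Spec_string_to_intdur_py (string : String) (out : List (List Int)) : Prop := out = string_to_intdur_py_alt string
instance (string : String) (out : List (List Int)) : Decidable (Spec_string_to_intdur_py string out) := by unfold Spec_string_to_intdur_py; infer_instance

-- ===== CLAIM (what is proved, stated in full; the proofs are below) =====
def Claim_equal_string_to_intdur_py : Prop := ∀ (string : String), Dom_string_to_intdur_py string → Spec_string_to_intdur_py string (string_to_intdur_py string)

-- ===== LEMMAS AND PROOFS =====

-- fuel-free model of PySem.Chars.splitOn · ['d']; cur is the current segment reversed
def pvSplitD (cur : List Char) : List Char → List (List Char)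
  | [] => [cur.reverse]
  | c :: rest => if c = 'd' then cur.reverse :: pvSplitD [] rest else pvSplitD (c :: cur) rest

lemma pv_go_zero (l cur acc) :
    PySem.Chars.splitOn.go ['d'] 0 l cur acc = ((cur.reverse ++ l) :: acc).reverse := rfl

lemma pv_go_nil (fuel cur acc) :
    PySem.Chars.splitOn.go ['d'] (fuel + 1) [] cur acc = (cur.reverse :: acc).reverse := rfl

lemma pv_go_d (fuel rest cur acc) :
    PySem.Chars.splitOn.go ['d'] (fuel + 1) ('d' :: rest) cur acc
      = PySem.Chars.splitOn.go ['d'] fuel rest [] (cur.reverse :: acc) := by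
  simp [PySem.Chars.splitOn.go, List.isPrefixOf]

lemma pv_go_ne (fuel c rest cur acc) (h : c ≠ 'd') :
    PySem.Chars.splitOn.go ['d'] (fuel + 1) (c :: rest) cur acc
      = PySem.Chars.splitOn.go ['d'] fuel rest (c :: cur) acc := by
  simp [PySem.Chars.splitOn.go, List.isPrefixOf, (Ne.symm h)]

lemma pv_go_eq_splitD : ∀ (l : List Char) (fuel : Nat) (cur : List Char) (acc : List (List Char)),
    l.length ≤ fuel →
    PySem.Chars.splitOn.go ['d'] fuel l cur acc = acc.reverse ++ pvSplitD cur l := by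
  intro l
  induction l with
  | nil =>
      intro fuel cur acc _
      cases fuel with
      | zero => simp [pv_go_zero, pvSplitD]
      | succ n => simp [pv_go_nil, pvSplitD]
  | cons c rest ih =>
      intro fuel cur acc hle
      cases fuel with
      | zero => simp at hle
      | succ n =>
        by_cases hc : c = 'd'
        · subst hc
          rw [pv_go_d, ih n [] (cur.reverse :: acc) (by simpa using hle)]
          simp [pvSplitD]
        · rw [pv_go_ne n c rest cur acc hc, ih n (c :: cur) acc (by simpa using hle)]
          simp [pvSplitD, hc]

lemma pv_splitOn_eq (l : List Char) : PySem.Chars.splitOn l ['d'] = pvSplitD [] l := by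
  have := pv_go_eq_splitD l (l.length + 1) [] [] (by omega)
  simpa [PySem.Chars.splitOn] using this

-- the value A appends for a non-empty segment, written with List.count
def pvSegVal (note : List Char) : List Int :=
  pvFin (note.count 'a') (note.count 'b') (note.count 'c')

lemma pv_fin_count (cur : List Char) :
    pvFin ((cur.count 'a' : Int)) (cur.count 'b') (cur.count 'c') = pvSegVal cur.reverse := by
  simp only [pvSegVal, List.count_reverse]

lemma pv_count_cons (c v : Char) (cur : List Char) :
    (((c :: cur).count v : Nat) : Int) = if c = v then ((cur.count v : Nat) : Int) + 1 else ((cur.count v : Nat) : Int) := by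
  by_cases h : c = v
  · subst h; simp
  · simp [h]

-- A's per-segment step, Counter lookups replaced by counts
def pvStepA (final : List (List Int)) (note : List Char) : List (List Int) :=
  if note = [] then final else final ++ [pvSegVal note]

lemma pv_A_eq_fold (s : String) :
    string_to_intdur_py s = (pvSplitD [] s.toList).foldl pvStepA [] := by
  unfold string_to_intdur_py
  rw [pv_splitOn_eq]
  apply PySem.List.foldl_congr_mem
  intro acc note _
  simp [pvStepA, pvSegVal, pvFin, PySem.Dict.getD_counter]

lemma pv_main : ∀ (cs cur : List Char) (acc : List (List Int)),
    pvFlushB (cs.foldl pvStepB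
        ((cur.count 'a' : Int), (cur.count 'b' : Int), (cur.count 'c' : Int), !cur.isEmpty, acc))
      = (pvSplitD cur cs).foldl pvStepA acc := by
  intro cs
  induction cs with
  | nil =>
      intro cur acc
      cases cur with
      | nil => simp [pvFlushB, pvSplitD, pvStepA]
      | cons x xs =>
          simp [pvFlushB, pvSplitD, pvStepA, pv_fin_count]
  | cons c rest ih =>
      intro cur acc
      by_cases hc : c = 'd'
      · subst hc
        have hstep : pvStepB ((cur.count 'a' : Int), (cur.count 'b' : Int), (cur.count 'c' : Int), !cur.isEmpty, acc) 'd'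
            = (0, 0, 0, false, pvStepA acc cur.reverse) := by
          cases cur with
          | nil => simp [pvStepB, pvStepA]
          | cons x xs => simp [pvStepB, pvStepA, pv_fin_count]
        have h0 := ih ([] : List Char) (pvStepA acc cur.reverse)
        simp only [List.foldl_cons, hstep, pvSplitD]
        simpa using h0
      · have hstep : pvStepB ((cur.count 'a' : Int), (cur.count 'b' : Int), (cur.count 'c' : Int), !cur.isEmpty, acc) c
            = (((c :: cur).count 'a' : Int), ((c :: cur).count 'b' : Int), ((c :: cur).count 'c' : Int), !(c :: cur).isEmpty, acc) := by
          simp only [pvStepB, if_neg hc, pv_count_cons, List.isEmpty_cons, Bool.not_false]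
        rw [List.foldl_cons, hstep, ih (c :: cur) acc]
        simp [pvSplitD, hc]

-- ===== VERDICT (by name: the statement is the Claim_ definition above) =====
theorem string_to_intdur_py_spec : Claim_equal_string_to_intdur_py := by
  intro s _
  unfold Spec_string_to_intdur_py string_to_intdur_py_alt
  rw [pv_A_eq_fold]
  have h := pv_main s.toList [] []
  simpa using h.symm
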